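-- pv_equiv track=rewrite | github.com/caveman0612/GUI-application | fusion chamber shutdown.py | burner
-- ===== SOURCE A (Python) =====
-- def burner(c,h,o):
--     water = 0
--     co2 = 0
--     methane = 0
--     carbon = c
--     hydrogen = h
--     oxygen = o
--     while hydrogen >= 2 and oxygen >= 1:
--         hydrogen += -2
--         oxygen += -1
--         water += 1
--     while carbon >= 1 and oxygen >= 2:
--         oxygen += -2
--         carbon += -1
--         co2 += 1
--     while carbon >= 1 and hydrogen >= 4:
--         hydrogen += -4
--         carbon += -1
--         methane += 1
--
--     return water,co2,methane
-- ===== SOURCE B (Python) =====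
-- def burner(c, h, o):
--     water = max(0, min(h // 2, o))
--     h2, o2 = h - 2 * water, o - water
--     co2 = max(0, min(c, o2 // 2))
--     c2 = c - co2
--     methane = max(0, min(c2, h2 // 4))
--     return water, co2, methane
-- ===== Notes on version B (the rewrite author's own statement) =====
-- stated objective: faster
-- what changed: replaced the three unit-step subtraction loops with closed-form min/floor-division formulas applied in the same sequential order
import Mathlib
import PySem

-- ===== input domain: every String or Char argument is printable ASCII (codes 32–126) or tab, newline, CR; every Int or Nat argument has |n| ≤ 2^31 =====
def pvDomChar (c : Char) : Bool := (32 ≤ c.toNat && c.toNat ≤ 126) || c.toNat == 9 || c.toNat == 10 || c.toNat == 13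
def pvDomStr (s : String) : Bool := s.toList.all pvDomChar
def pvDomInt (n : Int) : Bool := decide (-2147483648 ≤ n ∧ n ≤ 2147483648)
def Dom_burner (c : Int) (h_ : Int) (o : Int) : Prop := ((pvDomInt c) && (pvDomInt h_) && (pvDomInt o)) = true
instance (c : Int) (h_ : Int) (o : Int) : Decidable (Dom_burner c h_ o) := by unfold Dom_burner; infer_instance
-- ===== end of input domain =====

-- B replaces A's three unit-step subtraction loops by closed-form min / floor-division
-- formulas applied in the same sequential order (asymptotically faster).


-- ===== PORT A =====
-- while hydrogen >= 2 and oxygen >= 1: hydrogen -= 2; oxygen -= 1; water += 1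
def burnerLoopW (hydrogen oxygen water : Int) : Int × Int × Int :=
  if hydrogen ≥ 2 ∧ oxygen ≥ 1 then burnerLoopW (hydrogen - 2) (oxygen - 1) (water + 1)
  else (hydrogen, oxygen, water)
termination_by hydrogen.toNat
decreasing_by omega

-- while carbon >= 1 and oxygen >= 2: oxygen -= 2; carbon -= 1; co2 += 1
def burnerLoopC (carbon oxygen co2 : Int) : Int × Int × Int :=
  if carbon ≥ 1 ∧ oxygen ≥ 2 then burnerLoopC (carbon - 1) (oxygen - 2) (co2 + 1)
  else (carbon, oxygen, co2)
termination_by carbon.toNat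
decreasing_by omega

-- while carbon >= 1 and hydrogen >= 4: hydrogen -= 4; carbon -= 1; methane += 1
def burnerLoopM (carbon hydrogen methane : Int) : Int × Int × Int :=
  if carbon ≥ 1 ∧ hydrogen ≥ 4 then burnerLoopM (carbon - 1) (hydrogen - 4) (methane + 1)
  else (carbon, hydrogen, methane)
termination_by carbon.toNat
decreasing_by omega

def burner (c : Int) (h_ : Int) (o : Int) : Int × Int × Int :=
  let (hydrogen1, oxygen1, water) := burnerLoopW h_ o 0
  let (carbon2, _oxygen2, co2) := burnerLoopC c oxygen1 0
  let (_carbon3, _hydrogen3, methane) := burnerLoopM carbon2 hydrogen1 0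
  (water, co2, methane)

-- ===== PORT B =====
def burner_alt (c : Int) (h_ : Int) (o : Int) : Int × Int × Int :=
  let water := max 0 (min (PySem.Int.floordiv h_ 2) o)
  let h2 := h_ - 2 * water
  let o2 := o - water
  let co2 := max 0 (min c (PySem.Int.floordiv o2 2))
  let c2 := c - co2
  let methane := max 0 (min c2 (PySem.Int.floordiv h2 4))
  (water, co2, methane)

-- ===== PRECONDITION & SPEC =====
def Spec_burner (c : Int) (h_ : Int) (o : Int) (out : Int × Int × Int) : Prop := out = burner_alt c h_ o
instance (c : Int) (h_ : Int) (o : Int) (out : Int × Int × Int) : Decidable (Spec_burner c h_ o out) := by unfold Spec_burner; infer_instance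

-- ===== CLAIM (what is proved, stated in full; the proofs are below) =====
def Claim_equal_burner : Prop := ∀ (c : Int) (h_ : Int) (o : Int), Dom_burner c h_ o → Spec_burner c h_ o (burner c h_ o)

-- ===== LEMMAS AND PROOFS =====

theorem burnerLoopW_eq (hydrogen oxygen water : Int) :
    burnerLoopW hydrogen oxygen water =
      (hydrogen - 2 * max 0 (min (hydrogen / 2) oxygen),
       oxygen - max 0 (min (hydrogen / 2) oxygen),
       water + max 0 (min (hydrogen / 2) oxygen)) := by
  induction hydrogen, oxygen, water using burnerLoopW.induct with
  | case1 hydrogen oxygen water hc ih =>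
      rw [burnerLoopW, if_pos hc, ih]
      refine Prod.ext ?_ (Prod.ext ?_ ?_) <;> simp <;> omega
  | case2 hydrogen oxygen water hc =>
      rw [burnerLoopW, if_neg hc]
      refine Prod.ext ?_ (Prod.ext ?_ ?_) <;> simp <;> omega

theorem burnerLoopC_eq (carbon oxygen co2 : Int) :
    burnerLoopC carbon oxygen co2 =
      (carbon - max 0 (min carbon (oxygen / 2)),
       oxygen - 2 * max 0 (min carbon (oxygen / 2)),
       co2 + max 0 (min carbon (oxygen / 2))) := by
  induction carbon, oxygen, co2 using burnerLoopC.induct with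
  | case1 carbon oxygen co2 hc ih =>
      rw [burnerLoopC, if_pos hc, ih]
      refine Prod.ext ?_ (Prod.ext ?_ ?_) <;> simp <;> omega
  | case2 carbon oxygen co2 hc =>
      rw [burnerLoopC, if_neg hc]
      refine Prod.ext ?_ (Prod.ext ?_ ?_) <;> simp <;> omega

theorem burnerLoopM_eq (carbon hydrogen methane : Int) :
    burnerLoopM carbon hydrogen methane =
      (carbon - max 0 (min carbon (hydrogen / 4)),
       hydrogen - 4 * max 0 (min carbon (hydrogen / 4)),
       methane + max 0 (min carbon (hydrogen / 4))) := by
  induction carbon, hydrogen, methane using burnerLoopM.induct with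
  | case1 carbon hydrogen methane hc ih =>
      rw [burnerLoopM, if_pos hc, ih]
      refine Prod.ext ?_ (Prod.ext ?_ ?_) <;> simp <;> omega
  | case2 carbon hydrogen methane hc =>
      rw [burnerLoopM, if_neg hc]
      refine Prod.ext ?_ (Prod.ext ?_ ?_) <;> simp <;> omega

-- ===== VERDICT (by name: the statement is the Claim_ definition above) =====
theorem burner_spec : Claim_equal_burner := by
  intro c h_ o _
  unfold Spec_burner burner burner_alt
  simp only [burnerLoopW_eq, burnerLoopC_eq, burnerLoopM_eq,
      PySem.Int.floordiv_eq_ediv_of_pos (by norm_num : (0:Int) < 2),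
      PySem.Int.floordiv_eq_ediv_of_pos (by norm_num : (0:Int) < 4)]
  simp
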